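-- pv_equiv track=rewrite | github.com/DARRENSKY/COMP9021 | assignment/assignment_1/poker_dice.py | find_hand
-- ===== SOURCE A (Python) =====
-- hand_dic = {'Five of a kind':0, \
--             'Four of a kind':1, \
--             'Full house':2, \
--             'Straight':3, \
--             'Three of a kind':4, \
--             'Two pair':5,\
--             'One pair':6, \
--             'Bust':7}
--
-- def find_hand(dices):
--     dic = {}
--     for i in range(len(dices)):
--         if dices[i] in dic.keys():
--             dic[dices[i]] += 1
--         else:
--             dic[dices[i]] = 1
--
--     l = list(dic.values())
--     l.sort()
--     if 5 in l:
--         return hand_dic['Five of a kind']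
--     if 4 in l:
--         return hand_dic['Four of a kind']
--     if 3 in l and 2 in l:
--         return hand_dic['Full house']
--     c = 0
--     if len(l) == 5:
--         for i in range(1, len(dices)):
--             if dices[i] - dices[i - 1] == 1:
--                 c += 1
--     if c == 4:
--         return hand_dic['Straight']
--     if 3 in l:
--         return hand_dic['Three of a kind']
--     if len(l) == 3 and l[1] == 2 and l[2] == 2:
--         return hand_dic['Two pair']
--     if 2 in l:
--         return hand_dic['One pair']
--     return hand_dic['Bust']
-- ===== SOURCE B (Python) =====
-- def _run_lengths(s):
--     # run-length encode a sorted list: length of each maximal block of equal values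
--     runs = []
--     i = 0
--     while i < len(s):
--         n = i + 1
--         while n < len(s) and s[n] == s[i]:
--             n += 1
--         runs.append(n - i)
--         i = n
--     return runs
--
-- def find_hand(dices):
--     runs = sorted(_run_lengths(sorted(dices)))
--     if 5 in runs:
--         return 0
--     if 4 in runs:
--         return 1
--     if 3 in runs and 2 in runs:
--         return 2
--     if len(runs) == 5 and sum(b - a == 1 for a, b in zip(dices, dices[1:])) == 4:
--         return 3
--     if 3 in runs:
--         return 4
--     if len(runs) == 3 and runs[-1] == 2 and runs[-2] == 2:
--         return 5
--     if 2 in runs: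
--         return 6
--     return 7
-- ===== Notes on version B (the rewrite author's own statement) =====
-- stated objective: alternative
-- what changed: Replaces A's hash-style dict counting by sort-then-scan: B sorts the dice, run-length-encodes the sorted list to obtain the multiset of frequencies without any dict, and tests the two-pair shape by negative indexing and the straight by a zip-sum of adjacent increments.
import Mathlib
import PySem

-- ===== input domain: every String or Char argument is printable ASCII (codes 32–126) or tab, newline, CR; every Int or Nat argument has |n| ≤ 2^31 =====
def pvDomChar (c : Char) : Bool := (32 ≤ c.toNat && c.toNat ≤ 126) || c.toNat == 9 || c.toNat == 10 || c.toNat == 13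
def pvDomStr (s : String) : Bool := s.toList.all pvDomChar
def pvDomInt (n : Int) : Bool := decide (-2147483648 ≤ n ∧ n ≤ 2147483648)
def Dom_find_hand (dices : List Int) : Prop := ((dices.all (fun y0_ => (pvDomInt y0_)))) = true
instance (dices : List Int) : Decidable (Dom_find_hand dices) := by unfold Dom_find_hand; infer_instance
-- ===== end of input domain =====

-- B replaces A's dict counting by sort-then-scan: it sorts the dice, run-length-encodes the sorted
-- list to get the frequency multiset without a dict, and classifies on the sorted run lengths.

-- ===== PORT A =====
-- dices[i] is always indexed with i ∈ range(len(dices)) / range(1, len(dices)), so pyGetD with a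
-- dummy default is exact (Python never raises here).
def find_hand (dices : List Int) : Int :=
  let dic : PySem.Dict Int Int :=
    (PySem.List.pyRange 0 dices.length 1).foldl
      (fun d i =>
        let x := PySem.List.pyGetD dices i 0
        if d.contains x then d.insert x (d.getD x 0 + 1) else d.insert x 1)
      PySem.Dict.empty
  let l := PySem.List.sorted dic.values (fun v => v) false
  if l.contains 5 then 0
  else if l.contains 4 then 1
  else if l.contains 3 && l.contains 2 then 2
  else
    let c : Int :=
      if l.length == 5 then
        (PySem.List.pyRange 1 dices.length 1).foldl
          (fun c i =>
            if PySem.List.pyGetD dices i 0 - PySem.List.pyGetD dices (i - 1) 0 == 1 then c + 1 else c)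
          0
      else 0
    if c == 4 then 3
    else if l.contains 3 then 4
    -- l[1] / l[2] are only reached under len(l) == 3 (Python's `and` short-circuits), so pyGetD is exact
    else if l.length == 3 && PySem.List.pyGetD l 1 0 == 2 && PySem.List.pyGetD l 2 0 == 2 then 5
    else if l.contains 2 then 6
    else 7

-- ===== PORT B =====
-- inner while loop of _run_lengths: advance n while n < len(s) and s[n] == s[i]
def scanRun (s : List Int) (v : Int) (n : Nat) : Nat :=
  if h : n < s.length ∧ PySem.List.pyGetD s (n : Int) 0 = v then scanRun s v (n + 1) else n
termination_by s.length - n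
decreasing_by omega

lemma scanRun_ge (s : List Int) (v : Int) (n : Nat) : n ≤ scanRun s v n := by
  fun_induction scanRun with
  | case1 _ _ ih => omega
  | case2 => omega

-- outer while loop of _run_lengths: i walks block starts, appending each block length
def runLengthsLoop (s : List Int) (i : Nat) (runs : List Int) : List Int :=
  if _h : i < s.length then
    let n := scanRun s (PySem.List.pyGetD s (i : Int) 0) (i + 1)
    runLengthsLoop s n (runs ++ [((n - i : Nat) : Int)])
  else runs
termination_by s.length - i
decreasing_by have := scanRun_ge s (PySem.List.pyGetD s (i : Int) 0) (i + 1); omega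

def find_hand_alt (dices : List Int) : Int :=
  let runs := PySem.List.sorted (runLengthsLoop (PySem.List.sorted dices (fun v => v) false) 0 [])
                (fun v => v) false
  if runs.contains 5 then 0
  else if runs.contains 4 then 1
  else if runs.contains 3 && runs.contains 2 then 2
  else if runs.length == 5 &&
          ((dices.zip (PySem.List.slice dices (some 1) none)).map
            (fun p => if p.2 - p.1 == 1 then (1 : Int) else 0)).sum == 4 then 3
  else if runs.contains 3 then 4
  -- runs[-1] / runs[-2] only reached under len(runs) == 3 (`and` short-circuits), so pyGetD is exact
  else if runs.length == 3 && PySem.List.pyGetD runs (-1) 0 == 2 && PySem.List.pyGetD runs (-2) 0 == 2 then 5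
  else if runs.contains 2 then 6
  else 7

-- ===== PRECONDITION & SPEC =====
def Spec_find_hand (dices : List Int) (out : Int) : Prop := out = find_hand_alt dices
instance (dices : List Int) (out : Int) : Decidable (Spec_find_hand dices out) := by unfold Spec_find_hand; infer_instance

-- ===== CLAIM (what is proved, stated in full; the proofs are below) =====
def Claim_equal_find_hand : Prop := ∀ (dices : List Int), Dom_find_hand dices → Spec_find_hand dices (find_hand dices)

-- ===== LEMMAS AND PROOFS =====

-- A's counting step equals the Counter step
lemma count_step_eq (d : PySem.Dict Int Int) (x : Int) :
    (if d.contains x then d.insert x (d.getD x 0 + 1) else d.insert x 1)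
      = d.insert x (d.getD x 0 + 1) := by
  by_cases h : d.contains x
  · simp [h]
  · simp at h
    simp [h, PySem.Dict.getD_of_not_contains d 0 h]

-- A's index loop builds Counter(dices)
lemma dict_eq (dices : List Int) :
    (PySem.List.pyRange 0 dices.length 1).foldl
      (fun d i =>
        if d.contains (PySem.List.pyGetD dices i 0)
        then d.insert (PySem.List.pyGetD dices i 0) (d.getD (PySem.List.pyGetD dices i 0) 0 + 1)
        else d.insert (PySem.List.pyGetD dices i 0) 1)
      (PySem.Dict.empty : PySem.Dict Int Int)
      = PySem.Dict.counter dices := by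
  rw [← PySem.Dict.foldl_insert_getD_add_one_eq_counter]
  exact (PySem.List.foldl_pyRange_zero_pyGetD' dices 0
      (fun d x => if d.contains x then d.insert x (d.getD x 0 + 1) else d.insert x 1)
      PySem.Dict.empty).trans
    (PySem.List.foldl_congr_mem dices _ _ _ (fun d x _ => count_step_eq d x))

-- values of the counter: the count of each distinct element
lemma values_counter (xs : List Int) :
    (PySem.Dict.counter xs).values = (PySem.Set.ofList xs).map (fun k => (xs.count k : Int)) := by
  have h := PySem.Dict.items_counter (κ := Int) xs
  simp only [PySem.Dict.values, h, List.map_map]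
  rfl

-- specification of the run-length scan (proof helper, mirrors _run_lengths recursively)
def runsSpec : List Int → List Int
  | [] => []
  | x :: xs =>
      (((xs.takeWhile (· == x)).length + 1 : Nat) : Int) :: runsSpec (xs.dropWhile (· == x))
termination_by s => s.length
decreasing_by simpa using Nat.lt_succ_of_le (List.length_dropWhile_le _ _)

lemma scanRun_eq (s : List Int) (v : Int) (n : Nat) :
    scanRun s v n = n + ((s.drop n).takeWhile (· == v)).length := by
  fun_induction scanRun with
  | case1 n h ih =>
      obtain ⟨hn, hv⟩ := h
      simp only [PySem.List.pyGetD_natCast, List.getD_eq_getElem?_getD,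
        List.getElem?_eq_getElem hn, Option.getD_some] at hv
      rw [ih, List.drop_eq_getElem_cons hn]
      simp [hv]
      omega
  | case2 n h =>
      rcases Nat.lt_or_ge n s.length with hn | hn
      · have hv : ¬ (PySem.List.pyGetD s (n:Int) 0 = v) := by tauto
        simp only [PySem.List.pyGetD_natCast, List.getD_eq_getElem?_getD,
          List.getElem?_eq_getElem hn, Option.getD_some] at hv
        rw [List.drop_eq_getElem_cons hn]
        simp [hv]
      · simp [List.drop_eq_nil_of_le hn]

-- drop past the takeWhile prefix is dropWhile
lemma drop_takeWhile_length (p : Int → Bool) (l : List Int) :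
    l.drop (l.takeWhile p).length = l.dropWhile p := by
  have h := List.drop_left (l₁ := l.takeWhile p) (l₂ := l.dropWhile p)
  rwa [List.takeWhile_append_dropWhile] at h

lemma runLengthsLoop_eq (s : List Int) (i : Nat) (runs : List Int) (hi : i ≤ s.length) :
    runLengthsLoop s i runs = runs ++ runsSpec (s.drop i) := by
  fun_induction runLengthsLoop with
  | case1 i runs h n ih =>
      have hv : PySem.List.pyGetD s (i:Int) 0 = s[i] := by
        simp [PySem.List.pyGetD_natCast, List.getD_eq_getElem?_getD, List.getElem?_eq_getElem h]
      have hscan : n = (i + 1) + ((s.drop (i+1)).takeWhile (· == PySem.List.pyGetD s (i:Int) 0)).length :=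
        scanRun_eq s (PySem.List.pyGetD s (i:Int) 0) (i+1)
      have htw : ((s.drop (i+1)).takeWhile (· == PySem.List.pyGetD s (i:Int) 0)).length ≤ s.length - (i+1) := by
        have := (List.takeWhile_prefix (l := s.drop (i+1)) (· == PySem.List.pyGetD s (i:Int) 0)).length_le
        simpa using this
      rw [ih (by omega)]
      rw [List.drop_eq_getElem_cons h, ← hv]
      show runs ++ [((n - i : Nat) : Int)] ++ runsSpec (s.drop n)
          = runs ++ runsSpec (PySem.List.pyGetD s (i:Int) 0 :: s.drop (i+1))
      have hdrop : s.drop n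
          = (s.drop (i+1)).dropWhile (· == PySem.List.pyGetD s (i:Int) 0) := by
        rw [← drop_takeWhile_length (· == PySem.List.pyGetD s (i:Int) 0) (s.drop (i+1)),
          List.drop_drop]
        congr 1
      have hlen : ((n - i : Nat) : Int)
          = ((((s.drop (i+1)).takeWhile (· == PySem.List.pyGetD s (i:Int) 0)).length + 1 : Nat) : Int) := by
        exact_mod_cast congrArg (Nat.cast : Nat → Int) (by omega)
      rw [runsSpec, ← hdrop, hlen]
      simp
  | case2 i runs h =>
      simp [List.drop_eq_nil_of_le (by omega : s.length ≤ i), runsSpec]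

-- the first value of a sorted list does not survive its own dropWhile block
lemma not_mem_dropWhile_beq (x : Int) (xs : List Int) (hs : (x :: xs).Pairwise (· ≤ ·)) :
    x ∉ xs.dropWhile (· == x) := by
  intro hx
  cases hrr : xs.dropWhile (· == x) with
  | nil => rw [hrr] at hx; exact List.not_mem_nil hx
  | cons y r' =>
      rw [hrr] at hx
      have hne : xs.dropWhile (· == x) ≠ [] := by simp [hrr]
      have hy : ((y == x) : Bool) = false := by
        have h2 := List.head_dropWhile_not (· == x) hne
        rwa [show (xs.dropWhile (· == x)).head hne = y from by simp [hrr]] at h2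
      have hymem : y ∈ xs := (List.dropWhile_sublist _).mem (by rw [hrr]; exact List.mem_cons_self)
      have hxy : x ≤ y := (List.pairwise_cons.mp hs).1 y hymem
      have hpw : (y :: r').Pairwise (· ≤ ·) := by
        rw [← hrr]
        exact List.Pairwise.sublist (List.dropWhile_sublist _) (List.pairwise_cons.mp hs).2
      rcases List.mem_cons.mp hx with h | h
      · simp [h.symm] at hy
      · have hyx : y ≤ x := (List.pairwise_cons.mp hpw).1 x h
        have : y = x := le_antisymm hyx hxy
        simp [this] at hy

-- on a sorted list, the run lengths are a permutation of the per-distinct-value counts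
lemma runsSpec_perm (s : List Int) (hs : s.Pairwise (· ≤ ·)) :
    (runsSpec s).Perm (s.dedup.map (fun k => (s.count k : Int))) := by
  fun_induction runsSpec with
  | case1 => simp
  | case2 x xs ih =>
      set t := xs.takeWhile (· == x) with ht
      set r := xs.dropWhile (· == x) with hr
      have hxs : xs = t ++ r := (List.takeWhile_append_dropWhile).symm
      have htx : ∀ y ∈ t, y = x := fun y hy => by
        have := List.mem_takeWhile_imp hy; simpa using this
      have hxr : x ∉ r := not_mem_dropWhile_beq x xs hs
      have hrpw : r.Pairwise (· ≤ ·) :=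
        List.Pairwise.sublist (List.dropWhile_sublist _) (List.pairwise_cons.mp hs).2
      have hcx : (x :: xs).count x = t.length + 1 := by
        rw [List.count_cons_self, hxs, List.count_append]
        rw [List.count_eq_length.mpr (fun b hb => (htx b hb).symm),
          List.count_eq_zero.mpr hxr]
      have hck : ∀ k ∈ r, (x :: xs).count k = r.count k := by
        intro k hk
        have hkx : k ≠ x := fun h => hxr (h ▸ hk)
        have hxk : ¬ x = k := fun h => hkx h.symm
        rw [hxs]
        simp [List.count_append, hxk,
          List.count_eq_zero.mpr (fun hkt => hkx (htx k hkt))]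
      have hdedup : ((x :: xs).dedup).Perm (x :: r.dedup) := by
        refine (List.perm_ext_iff_of_nodup (List.nodup_dedup _)
          (List.nodup_cons.mpr ⟨fun h => hxr (List.mem_dedup.mp h), List.nodup_dedup _⟩)).mpr ?_
        · intro a
          simp only [List.mem_dedup, List.mem_cons, hxs, List.mem_append]
          constructor
          · rintro (h | h | h)
            · exact Or.inl h
            · exact Or.inl (htx a h)
            · exact Or.inr h
          · rintro (h | h)
            · exact Or.inl h
            · exact Or.inr (Or.inr h)
      have h1 : ((t.length + 1 : Nat) : Int) = (((x :: xs).count x : Int)) := by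
        rw [hcx]
      have h3 : (((x :: xs).count x : Int)) :: r.dedup.map (fun k => (r.count k : Int))
          = (x :: r.dedup).map (fun k => (((x :: xs).count k : Int))) := by
        simp only [List.map_cons]
        congr 1
        apply List.map_congr_left
        intro k hk
        rw [hck k (List.mem_dedup.mp hk)]
      rw [h1]
      exact (((ih hrpw).cons _).trans (h3 ▸ (hdedup.map _).symm))

-- B's run-length list is a permutation of A's dict values
lemma runs_perm_values (dices : List Int) :
    (runLengthsLoop (PySem.List.sorted dices (fun v => v) false) 0 []).Perm
      ((PySem.Dict.counter dices).values) := by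
  have hperm := PySem.List.sorted_perm dices (fun v => v) false
  have hpw : (PySem.List.sorted dices (fun v => v) false).Pairwise (· ≤ ·) := by
    have := PySem.List.sorted_pairwise dices (fun v => v)
    simpa using this
  rw [runLengthsLoop_eq _ 0 [] (by omega), List.drop_zero, List.nil_append, values_counter]
  refine (runsSpec_perm _ hpw).trans ?_
  have hcnt : (PySem.List.sorted dices (fun v => v) false).dedup.map
        (fun k => ((PySem.List.sorted dices (fun v => v) false).count k : Int))
      = (PySem.List.sorted dices (fun v => v) false).dedup.map
        (fun k => (dices.count k : Int)) := by
    apply List.map_congr_left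
    intro k _
    rw [hperm.count_eq]
  rw [hcnt]
  refine List.Perm.map _ ?_
  refine (List.perm_ext_iff_of_nodup (List.nodup_dedup _) (PySem.Set.nodup_ofList _)).mpr ?_
  intro a
  rw [List.mem_dedup, PySem.Set.mem_ofList, PySem.List.mem_sorted]

-- hence the two sorted count lists coincide
lemma sorted_counts_eq (dices : List Int) :
    PySem.List.sorted (runLengthsLoop (PySem.List.sorted dices (fun v => v) false) 0 [])
        (fun v => v) false
      = PySem.List.sorted (PySem.Dict.counter dices).values (fun v => v) false := by
  exact (PySem.List.sorted_id_eq_sorted_id_iff_perm _ _).mpr (runs_perm_values dices)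

-- A's index-pair view of adjacent elements is B's zip
lemma pairs_eq (dices : List Int) :
    (PySem.List.pyRange 1 dices.length 1).map
      (fun i => (PySem.List.pyGetD dices (i - 1) 0, PySem.List.pyGetD dices i 0))
      = dices.zip (PySem.List.slice dices (some 1) none) := by
  rw [PySem.List.slice_from dices (by norm_num)]
  apply List.ext_getElem
  · simp [PySem.List.length_pyRange_one]
  · intro k h1 h2
    simp only [List.getElem_map, PySem.List.getElem_pyRange_one, List.getElem_zip]
    simp only [List.length_map, PySem.List.length_pyRange_one] at h1
    have hk : k + 1 < dices.length := by omega
    apply Prod.ext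
    · rw [show (1 : Int) + k - 1 = ((k : Nat) : Int) from by omega, PySem.List.pyGetD_natCast]
      simp [List.getD_eq_getElem?_getD, List.getElem?_eq_getElem (by omega : k < dices.length)]
    · rw [show (1 : Int) + k = ((k+1 : Nat) : Int) from by push_cast; ring, PySem.List.pyGetD_natCast]
      simp [List.getD_eq_getElem?_getD, List.getElem?_eq_getElem hk]

-- the straight counters agree
lemma runs_eq (dices : List Int) :
    (PySem.List.pyRange 1 dices.length 1).foldl
      (fun c i =>
        if PySem.List.pyGetD dices i 0 - PySem.List.pyGetD dices (i - 1) 0 == 1 then c + 1 else c)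
      0
    = ((dices.zip (PySem.List.slice dices (some 1) none)).map
        (fun p => if p.2 - p.1 == 1 then (1 : Int) else 0)).sum := by
  have hR := PySem.List.sum_map_ite_one_zero (fun q : Int × Int => q.2 - q.1 == 1)
    (dices.zip (PySem.List.slice dices (some 1) none))
  rw [hR, ← pairs_eq dices, List.countP_map]
  have hL := PySem.List.foldl_count_if
    (fun i => PySem.List.pyGetD dices i 0 - PySem.List.pyGetD dices (i - 1) 0 == 1)
    (PySem.List.pyRange 1 dices.length 1) 0
  rw [hL]
  norm_num
  rfl

-- positive positional two-pair test = negative-index two-pair test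
lemma two_pair_idx (L : List Int) :
    (L.length == 3 && PySem.List.pyGetD L 1 0 == 2 && PySem.List.pyGetD L 2 0 == 2)
      = (L.length == 3 && PySem.List.pyGetD L (-1) 0 == 2 && PySem.List.pyGetD L (-2) 0 == 2) := by
  by_cases h : L.length = 3
  · match L, h with
    | [a,b,c], _ =>
        have e1 : PySem.List.pyGetD [a,b,c] (1:Int) 0 = b := by simp [pysem]
        have e2 : PySem.List.pyGetD [a,b,c] (2:Int) 0 = c := by simp [pysem]
        have e3 : PySem.List.pyGetD [a,b,c] (-1:Int) 0 = c := by
          rw [PySem.List.pyGetD_neg_ofNat [a,b,c] 1 0 (by omega) (by simp)]; rfl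
        have e4 : PySem.List.pyGetD [a,b,c] (-2:Int) 0 = b := by
          rw [PySem.List.pyGetD_neg_ofNat [a,b,c] 2 0 (by omega) (by simp)]; rfl
        rw [e1, e2, e3, e4]
        cases hb : (b == (2:Int)) <;> cases hc : (c == (2:Int)) <;> simp_all
  · have hL : (L.length == 3) = false := by simpa using h
    simp [hL]

-- collapsing A's guarded counter into B's conjunction
lemma straight_cond (b : Bool) (r : Int) : ((if b then r else 0) == 4) = (b && (r == 4)) := by
  cases b <;> simp

-- ===== VERDICT (by name: the statement is the Claim_ definition above) =====
theorem find_hand_spec : Claim_equal_find_hand := by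
  intro dices _
  show find_hand dices = find_hand_alt dices
  unfold find_hand find_hand_alt
  simp only []
  rw [dict_eq dices, ← sorted_counts_eq dices, runs_eq, straight_cond, two_pair_idx]
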